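-- pv_equiv track=rewrite | github.com/vincemic-pc/robot | scripts/sensor_snapshot.py | _heading_to_cardinal
-- ===== SOURCE A (Python) =====
-- CARDINAL_DIRECTIONS = [
--     (0, "N"), (45, "NE"), (90, "E"), (135, "SE"),
--     (180, "S"), (225, "SW"), (270, "W"), (315, "NW"), (360, "N"),
-- ]
--
-- def _heading_to_cardinal(heading_deg):
--     """Convert heading in degrees (0=N, CW) to cardinal direction string."""
--     heading_deg = heading_deg % 360
--     best = "N"
--     best_diff = 360
--     for deg, cardinal in CARDINAL_DIRECTIONS:
--         diff = abs(heading_deg - deg)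
--         if diff < best_diff:
--             best_diff = diff
--             best = cardinal
--     return best
-- ===== SOURCE B (Python) =====
-- _DIRS = ["N", "NE", "E", "SE", "S", "SW", "W", "NW", "N"]
--
-- def _heading_to_cardinal(heading_deg):
--     """Convert heading in degrees (0=N, CW) to cardinal direction string."""
--     return _DIRS[(heading_deg % 360 + 22) // 45]
-- ===== Notes on version B (the rewrite author's own statement) =====
-- stated objective: simpler
-- what changed: Replaced the best/best_diff scan over the direction table with a closed-form bucket index DIRS[(heading % 360 + 22) // 45]; integer headings never hit an exact half-way tie, so half-offset flooring matches A exactly.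
import Mathlib
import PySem

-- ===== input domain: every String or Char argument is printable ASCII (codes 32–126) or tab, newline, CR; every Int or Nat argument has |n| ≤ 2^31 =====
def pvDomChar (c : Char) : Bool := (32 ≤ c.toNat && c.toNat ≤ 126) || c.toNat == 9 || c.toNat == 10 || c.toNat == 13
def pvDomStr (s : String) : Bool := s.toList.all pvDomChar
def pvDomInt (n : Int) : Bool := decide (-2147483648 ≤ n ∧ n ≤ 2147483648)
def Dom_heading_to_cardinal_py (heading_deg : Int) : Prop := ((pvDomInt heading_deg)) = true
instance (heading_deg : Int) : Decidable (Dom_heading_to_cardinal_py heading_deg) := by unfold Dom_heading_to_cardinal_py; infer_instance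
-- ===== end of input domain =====

-- B replaces A's best/best_diff scan over the 9-entry table with a closed-form bucket index: simpler, same cost.

-- ===== PORT A =====
def pvCardinals : List (Int × String) :=
  [(0, "N"), (45, "NE"), (90, "E"), (135, "SE"),
   (180, "S"), (225, "SW"), (270, "W"), (315, "NW"), (360, "N")]

def heading_to_cardinal_py (heading_deg : Int) : String :=
  let h := PySem.Int.mod heading_deg 360
  (pvCardinals.foldl
    (fun (st : String × Int) dc =>
      let diff := |h - dc.1|
      if diff < st.2 then (dc.2, diff) else st)
    ("N", (360 : Int))).1

-- ===== PORT B =====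
def pvDirs : List String := ["N", "NE", "E", "SE", "S", "SW", "W", "NW", "N"]

-- the index (h % 360 + 22) // 45 always lies in [0, 8], so Python's list indexing never raises; getD "" is never taken
def heading_to_cardinal_py_alt (heading_deg : Int) : String :=
  (PySem.List.pyGet? pvDirs
    (PySem.Int.floordiv (PySem.Int.mod heading_deg 360 + 22) 45)).getD ""

-- ===== PRECONDITION & SPEC =====
def Spec_heading_to_cardinal_py (heading_deg : Int) (out : String) : Prop := out = heading_to_cardinal_py_alt heading_deg
instance (heading_deg : Int) (out : String) : Decidable (Spec_heading_to_cardinal_py heading_deg out) := by unfold Spec_heading_to_cardinal_py; infer_instance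

-- ===== CLAIM (what is proved, stated in full; the proofs are below) =====
def Claim_equal_heading_to_cardinal_py : Prop := ∀ (heading_deg : Int), Dom_heading_to_cardinal_py heading_deg → Spec_heading_to_cardinal_py heading_deg (heading_to_cardinal_py heading_deg)

-- ===== LEMMAS AND PROOFS =====

-- a residue already in [0, 360) is its own mod 360
theorem pv_small_mod (r : Int) (h0 : 0 ≤ r) (h1 : r < 360) : PySem.Int.mod r 360 = r := by
  rw [PySem.Int.mod_eq_emod_of_pos (by omega)]; omega

-- the two ports agree on every residue 0 ≤ n < 360
set_option maxRecDepth 4000 in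
theorem pv_key : ∀ n : Nat, n < 360 →
    heading_to_cardinal_py (n : Int) = heading_to_cardinal_py_alt (n : Int) := by decide

-- ===== VERDICT (by name: the statement is the Claim_ definition above) =====
theorem heading_to_cardinal_py_spec : Claim_equal_heading_to_cardinal_py := by
  intro h _
  unfold Spec_heading_to_cardinal_py
  have hnn : 0 ≤ PySem.Int.mod h 360 := PySem.Int.mod_nonneg h (by omega)
  have hlt : PySem.Int.mod h 360 < 360 := PySem.Int.mod_lt h (by omega)
  set r := PySem.Int.mod h 360 with hr
  have hcast : ((r.toNat : Int)) = r := Int.toNat_of_nonneg hnn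
  have hA : heading_to_cardinal_py h = heading_to_cardinal_py (r.toNat : Int) := by
    simp only [heading_to_cardinal_py, hcast, pv_small_mod r hnn hlt, ← hr]
  have hB : heading_to_cardinal_py_alt h = heading_to_cardinal_py_alt (r.toNat : Int) := by
    simp only [heading_to_cardinal_py_alt, hcast, pv_small_mod r hnn hlt, ← hr]
  rw [hA, hB, pv_key r.toNat (by omega)]
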